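-- pv_equiv track=rewrite | github.com/petertzy/CleverGit | clevergit/ui/widgets/diff_viewer.py | _collapse_unchanged_sections
-- ===== SOURCE A (Python) =====
-- from typing import Optional, List
--
-- def _collapse_unchanged_sections(diff_text: str) -> str:
--     """
--     Collapse unchanged context sections in the diff.
--
--     Args:
--         diff_text: Raw diff text
--
--     Returns:
--         Diff text with collapsed unchanged sections
--     """
--     lines = diff_text.split("\n")
--     result: List[str] = []
--     context_buffer: List[str] = []
--     context_lines = 3  # Show 3 lines of context around changes
--
--     for line in lines:
--         # Always show headers and changed lines
--         if (
--             line.startswith("diff --git")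
--             or line.startswith("---")
--             or line.startswith("+++")
--             or line.startswith("@@")
--             or line.startswith("+")
--             or line.startswith("-")
--         ):
--
--             # Add buffered context
--             if len(context_buffer) > context_lines * 2:
--                 # Too many context lines - collapse middle
--                 result.extend(context_buffer[:context_lines])
--                 result.append(
--                     f"... ({len(context_buffer) - context_lines * 2} unchanged lines) ..."
--                 )
--                 result.extend(context_buffer[-context_lines:])
--             else:
--                 result.extend(context_buffer)
--
--             context_buffer = []
--             result.append(line)
--         else:
--             # Buffer context lines
--             context_buffer.append(line)
--
--     # Add remaining context
--     if context_buffer: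
--         if len(context_buffer) > context_lines:
--             result.extend(context_buffer[:context_lines])
--             result.append(f"... ({len(context_buffer) - context_lines} unchanged lines) ...")
--         else:
--             result.extend(context_buffer)
--
--     return "\n".join(result)
-- ===== SOURCE B (Python) =====
-- from itertools import groupby
--
-- def _collapse_unchanged_sections(diff_text: str) -> str:
--     def is_marker(line: str) -> bool:
--         return line.startswith(("diff --git", "---", "+++", "@@", "+", "-"))
--
--     context_lines = 3
--     groups = [(key, list(grp)) for key, grp in groupby(diff_text.split("\n"), key=is_marker)]
--     out = []
--     for i, (marker, g) in enumerate(groups):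
--         if marker:
--             out.extend(g)
--         elif i == len(groups) - 1:
--             # trailing context group
--             if len(g) > context_lines:
--                 out.extend(g[:context_lines])
--                 out.append(f"... ({len(g) - context_lines} unchanged lines) ...")
--             else:
--                 out.extend(g)
--         else:
--             # interior context group
--             if len(g) > 2 * context_lines:
--                 out.extend(g[:context_lines])
--                 out.append(f"... ({len(g) - 2 * context_lines} unchanged lines) ...")
--                 out.extend(g[-context_lines:])
--             else:
--                 out.extend(g)
--     return "\n".join(out)
-- ===== Notes on version B (the rewrite author's own statement) =====
-- stated objective: idiomatic
-- what changed: Replaces A's imperative running context_buffer with marker-flush bookkeeping by a single itertools.groupby pass that splits the lines into marker/context runs and emits each run by the interior or trailing collapse rule.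
import Mathlib
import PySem

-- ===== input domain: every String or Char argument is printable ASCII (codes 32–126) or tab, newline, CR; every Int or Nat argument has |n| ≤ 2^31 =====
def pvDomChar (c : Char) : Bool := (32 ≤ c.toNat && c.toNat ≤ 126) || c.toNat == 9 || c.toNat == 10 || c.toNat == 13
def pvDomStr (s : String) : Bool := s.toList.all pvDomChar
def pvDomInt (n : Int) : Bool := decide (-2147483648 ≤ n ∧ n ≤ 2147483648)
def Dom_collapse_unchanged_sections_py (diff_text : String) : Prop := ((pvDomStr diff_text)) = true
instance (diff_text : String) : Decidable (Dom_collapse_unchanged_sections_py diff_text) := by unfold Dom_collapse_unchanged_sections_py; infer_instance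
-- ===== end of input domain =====

-- B replaces A's running context buffer with an itertools.groupby pass over marker/context
-- runs (objective: idiomatic; same cost). Return-value equivalence; neither version mutates.

-- ===== PORT A =====
-- A's f"... ({n} unchanged lines) ..."
def pvNoteA (n : Int) : String := "... (" ++ PySem.Int.toStr n ++ " unchanged lines) ..."

-- A's inline or-chain of startswith tests
def pvMarkerA (line : String) : Bool :=
  PySem.Str.startswith line "diff --git" || PySem.Str.startswith line "---" ||
  PySem.Str.startswith line "+++" || PySem.Str.startswith line "@@" ||
  PySem.Str.startswith line "+" || PySem.Str.startswith line "-"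

-- A's for-loop over lines carrying (result, context_buffer), then the trailing flush
def pvALoop : List String → List String → List String → List String
  | [], result, buf =>
      if buf ≠ [] then
        if buf.length > 3 then
          result ++ PySem.List.slice buf none (some 3) ++ [pvNoteA ((buf.length : Int) - 3)]
        else
          result ++ buf
      else result
  | line :: rest, result, buf =>
      if pvMarkerA line then
        let result :=
          if buf.length > 3 * 2 then
            result ++ PySem.List.slice buf none (some 3)
              ++ [pvNoteA ((buf.length : Int) - 3 * 2)]
              ++ PySem.List.slice buf (some (-3)) none
          else result ++ buf
        pvALoop rest (result ++ [line]) []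
      else
        pvALoop rest result (buf ++ [line])

def collapse_unchanged_sections_py (diff_text : String) : String :=
  PySem.Str.join "\n" (pvALoop ((PySem.Str.split? diff_text "\n").getD []) [] [])

-- ===== PORT B =====
def pvNoteB (n : Int) : String := "... (" ++ PySem.Int.toStr n ++ " unchanged lines) ..."

-- B's is_marker helper (startswith with a tuple of prefixes)
def pvIsMarker (line : String) : Bool :=
  PySem.Str.startswith line "diff --git" || PySem.Str.startswith line "---" ||
  PySem.Str.startswith line "+++" || PySem.Str.startswith line "@@" ||
  PySem.Str.startswith line "+" || PySem.Str.startswith line "-"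

-- itertools.groupby keyed on is_marker, each group materialised as a list
def pvGroups : List String → List (Bool × List String)
  | [] => []
  | l :: ls =>
      let k := pvIsMarker l
      (k, l :: ls.takeWhile (fun x => pvIsMarker x == k)) ::
        pvGroups (ls.dropWhile (fun x => pvIsMarker x == k))
termination_by ls => ls.length
decreasing_by
  simp only [List.length_cons]
  exact Nat.lt_succ_of_le (List.length_dropWhile_le _ _)

-- B's loop over the groups: marker groups verbatim, the last context group by the
-- trailing rule, interior context groups by the interior rule
def pvEmit : List (Bool × List String) → List String
  | [] => []
  | [(k, g)] =>
      if k then g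
      else if g.length > 3 then
        PySem.List.slice g none (some 3) ++ [pvNoteB ((g.length : Int) - 3)]
      else g
  | (k, g) :: gs =>
      (if k then g
       else if g.length > 2 * 3 then
         PySem.List.slice g none (some 3)
           ++ [pvNoteB ((g.length : Int) - 2 * 3)]
           ++ PySem.List.slice g (some (-3)) none
       else g) ++ pvEmit gs

def collapse_unchanged_sections_py_alt (diff_text : String) : String :=
  PySem.Str.join "\n" (pvEmit (pvGroups ((PySem.Str.split? diff_text "\n").getD [])))

-- ===== PRECONDITION & SPEC =====
def Spec_collapse_unchanged_sections_py (diff_text : String) (out : String) : Prop := out = collapse_unchanged_sections_py_alt diff_text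
instance (diff_text : String) (out : String) : Decidable (Spec_collapse_unchanged_sections_py diff_text out) := by unfold Spec_collapse_unchanged_sections_py; infer_instance

-- ===== CLAIM (what is proved, stated in full; the proofs are below) =====
def Claim_equal_collapse_unchanged_sections_py : Prop := ∀ (diff_text : String), Dom_collapse_unchanged_sections_py diff_text → Spec_collapse_unchanged_sections_py diff_text (collapse_unchanged_sections_py diff_text)

-- ===== LEMMAS AND PROOFS =====

theorem pvMarker_eq : pvIsMarker = pvMarkerA := rfl
theorem pvNote_eq : pvNoteB = pvNoteA := rfl

-- the key comparison B's groupby uses on a context (key = false) group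
def pvP (x : String) : Bool := pvIsMarker x == false

theorem pvP_eq (x : String) : pvP x = !pvMarkerA x := by
  simp only [pvP, pvMarker_eq]; cases pvMarkerA x <;> simp

theorem pvP_fun_eq : (fun x => pvIsMarker x == false) = pvP := rfl

-- the two flush rules, as A writes them
def pvFlushT (g : List String) : List String :=
  if g.length > 3 then PySem.List.slice g none (some 3) ++ [pvNoteA ((g.length : Int) - 3)]
  else g

def pvFlushI (g : List String) : List String :=
  if g.length > 3 * 2 then
    PySem.List.slice g none (some 3) ++ [pvNoteA ((g.length : Int) - 3 * 2)]
      ++ PySem.List.slice g (some (-3)) none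
  else g

-- A's loop with the result accumulator factored out
theorem pvALoop_append (ls : List String) : ∀ res buf,
    pvALoop ls res buf = res ++ pvALoop ls [] buf := by
  induction ls with
  | nil =>
      intro res buf
      simp only [pvALoop]
      split_ifs <;> simp
  | cons l ls ih =>
      intro res buf
      by_cases h : pvMarkerA l
      · simp only [pvALoop, h, if_true]
        rw [ih]
        conv_rhs => rw [ih]
        split_ifs <;> simp
      · simp only [pvALoop, h]
        exact ih res (buf ++ [l])

-- A's loop consumes a context run, then flushes at the next marker (or at the end)
theorem pvALoop_context (ls : List String) : ∀ buf,
    pvALoop ls [] buf =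
      match ls.dropWhile pvP with
      | [] => pvFlushT (buf ++ ls.takeWhile pvP)
      | m :: rs => pvFlushI (buf ++ ls.takeWhile pvP) ++ m :: pvALoop rs [] [] := by
  induction ls with
  | nil =>
      intro buf
      simp only [List.dropWhile_nil, List.takeWhile_nil, List.append_nil, pvFlushT]
      by_cases h : buf = []
      · simp [pvALoop, h]
      · simp only [pvALoop, h, ne_eq, not_false_iff, if_true]
        split_ifs <;> simp
  | cons l ls ih =>
      intro buf
      by_cases h : pvMarkerA l
      · have hp : pvP l = false := by simp [pvP_eq, h]
        simp only [pvALoop, h, if_true, List.dropWhile_cons, List.takeWhile_cons, hp,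
          Bool.false_eq_true, if_false]
        rw [pvALoop_append]
        simp only [pvFlushI, List.append_nil]
        split_ifs <;> simp
      · have hp : pvP l = true := by simp [pvP_eq, h]
        simp only [pvALoop, h, List.dropWhile_cons, List.takeWhile_cons, hp, if_true]
        rw [ih (buf ++ [l])]
        cases hd : ls.dropWhile pvP <;> simp

theorem pvGroups_nil : pvGroups [] = [] := by simp [pvGroups]

theorem pvGroups_cons (l : String) (ls : List String) :
    pvGroups (l :: ls) =
      (pvIsMarker l, l :: ls.takeWhile (fun x => pvIsMarker x == pvIsMarker l)) ::
        pvGroups (ls.dropWhile (fun x => pvIsMarker x == pvIsMarker l)) := by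
  simp [pvGroups]

theorem pvGroups_ne_nil (l : String) (ls : List String) : pvGroups (l :: ls) ≠ [] := by
  simp [pvGroups_cons]

-- pvEmit on a group with a nonempty tail takes the interior branch
theorem pvEmit_cons_of_ne_nil (k : Bool) (g : List String) (gs : List (Bool × List String))
    (h : gs ≠ []) :
    pvEmit ((k, g) :: gs) =
      (if k then g
       else if g.length > 2 * 3 then
         PySem.List.slice g none (some 3)
           ++ [pvNoteB ((g.length : Int) - 2 * 3)]
           ++ PySem.List.slice g (some (-3)) none
       else g) ++ pvEmit gs := by
  cases gs with
  | nil => exact absurd rfl h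
  | cons g' gs' => rfl

-- a leading marker line is emitted verbatim, before the rest of the groups
theorem pvEmit_marker (m : String) (rs : List String) (hm : pvIsMarker m = true) :
    pvEmit (pvGroups (m :: rs)) = m :: pvEmit (pvGroups rs) := by
  rw [pvGroups_cons, hm]
  cases rs with
  | nil => simp [pvGroups_nil, pvEmit]
  | cons h rs' =>
      by_cases hh : pvIsMarker h
      · -- h joins m's marker group
        rw [pvGroups_cons, hh]
        simp only [List.takeWhile_cons, List.dropWhile_cons, hh, beq_self_eq_true, if_true]
        cases hG : pvGroups (rs'.dropWhile (fun x => pvIsMarker x == true)) with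
        | nil => simp [pvEmit]
        | cons g gs => simp [pvEmit]
      · -- context follows: m's group is [m]
        have hq : (pvIsMarker h == true) = false := by simp [hh]
        simp only [List.takeWhile_cons, List.dropWhile_cons, hq, Bool.false_eq_true, if_false]
        cases hG : pvGroups (h :: rs') with
        | nil => exact absurd hG (pvGroups_ne_nil _ _)
        | cons g gs => simp [pvEmit]

theorem pvDropWhile_head_false {α : Type} (p : α → Bool) :
    ∀ (l : List α) (m : α) (rs : List α), l.dropWhile p = m :: rs → p m = false := by
  intro l
  induction l with
  | nil => intro m rs h; simp at h
  | cons a l ih =>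
      intro m rs h
      by_cases ha : p a
      · rw [List.dropWhile_cons_of_pos ha] at h; exact ih _ _ h
      · rw [List.dropWhile_cons_of_neg ha] at h
        cases h; simpa using ha

-- main agreement between A's loop and B's groupby emission
theorem pvMain : ∀ (n : Nat) (ls : List String), ls.length ≤ n →
    pvALoop ls [] [] = pvEmit (pvGroups ls) := by
  intro n
  induction n with
  | zero =>
      intro ls h
      have : ls = [] := List.length_eq_zero_iff.mp (Nat.le_zero.mp h)
      subst this
      simp [pvALoop, pvGroups_nil, pvEmit]
  | succ n ih =>
      intro ls h
      cases ls with
      | nil => simp [pvALoop, pvGroups_nil, pvEmit]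
      | cons l ls =>
          by_cases hm : pvMarkerA l
          · have hm' : pvIsMarker l = true := by rw [pvMarker_eq]; exact hm
            simp only [pvALoop, hm, if_true]
            rw [pvALoop_append, ih ls (Nat.le_of_succ_le_succ h),
              pvEmit_marker l ls hm']
            simp
          · have hm' : pvIsMarker l = false := by rw [pvMarker_eq]; simpa using hm
            have hp : pvP l = true := by simp [pvP_eq, hm]
            have h1 : pvALoop (l :: ls) [] [] = pvALoop ls [] [l] := by
              simp [pvALoop, hm]
            rw [h1, pvALoop_context ls [l], pvGroups_cons, hm', pvP_fun_eq]
            cases hd : List.dropWhile pvP ls with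
            | nil =>
                show pvFlushT ([l] ++ List.takeWhile pvP ls) = _
                simp [pvGroups_nil, pvEmit, pvFlushT, pvNote_eq]
            | cons m rs =>
                have hpm : pvP m = false := pvDropWhile_head_false pvP ls m rs hd
                have hmm' : pvIsMarker m = true := by
                  rw [pvP_eq] at hpm
                  rw [pvMarker_eq]
                  simpa using hpm
                have hlen : rs.length ≤ n := by
                  have h1 : (ls.dropWhile pvP).length ≤ ls.length :=
                    List.length_dropWhile_le _ _
                  rw [hd] at h1
                  simp only [List.length_cons] at h h1
                  omega
                show pvFlushI ([l] ++ List.takeWhile pvP ls) ++ m :: pvALoop rs [] [] = _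
                rw [pvEmit_cons_of_ne_nil _ _ _ (pvGroups_ne_nil m rs),
                  pvEmit_marker m rs hmm', ih rs hlen]
                simp only [pvFlushI, pvNote_eq]
                norm_num
  -- (the two branches agree up to associativity)

-- ===== VERDICT (by name: the statement is the Claim_ definition above) =====
theorem collapse_unchanged_sections_py_spec : Claim_equal_collapse_unchanged_sections_py := by
  intro diff_text _
  unfold Spec_collapse_unchanged_sections_py collapse_unchanged_sections_py
    collapse_unchanged_sections_py_alt
  rw [pvMain ((PySem.Str.split? diff_text "\n").getD []).length _ (Nat.le_refl _)]
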